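-- pv_equiv track=rewrite | github.com/ontwo1821/study | programmers/lv0/ongal.py | solution
-- ===== SOURCE A (Python) =====
-- def solution(babbling):
--     speak = ["aya", "ye", "woo", "ma"]
--     answer = 0
--     for babb in babbling:
--         word = ''
--         # 각 단어는 한번씩 사용 가능
--         for i, b in enumerate(babb):
--             word += b
--             if word in speak:
--                 word = ''
--             if i + 1 == len(babb) and word == '':
--                 answer += 1
--
--     return answer
-- ===== SOURCE B (Python) =====
-- def solution(babbling):
--     words = ("aya", "ye", "woo", "ma")
--
--     def ok(s):
--         while s:
--             for w in words:
--                 if s.startswith(w):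
--                     s = s[len(w):]
--                     break
--             else:
--                 return False
--         return True
--
--     return sum(1 for b in babbling if b and ok(b))
-- ===== Notes on version B (the rewrite author's own statement) =====
-- stated objective: simpler
-- what changed: Replaces the char-by-char accumulator with index bookkeeping by greedy prefix stripping (the syllable set is a prefix code, so greedy stripping decides exactly the same strings), counted with a sum over the list.
import Mathlib
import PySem

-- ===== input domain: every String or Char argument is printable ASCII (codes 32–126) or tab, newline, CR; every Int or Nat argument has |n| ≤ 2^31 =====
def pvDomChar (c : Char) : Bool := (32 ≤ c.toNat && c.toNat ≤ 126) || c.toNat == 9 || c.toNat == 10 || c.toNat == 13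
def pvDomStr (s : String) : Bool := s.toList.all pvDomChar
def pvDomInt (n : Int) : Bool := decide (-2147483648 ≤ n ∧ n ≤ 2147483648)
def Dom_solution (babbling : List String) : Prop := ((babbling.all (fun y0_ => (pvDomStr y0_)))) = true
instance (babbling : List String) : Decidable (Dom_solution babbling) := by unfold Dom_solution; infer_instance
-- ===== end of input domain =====

-- B replaces A's char-accumulator loop with greedy prefix stripping (the syllable set is a
-- prefix code, so both decide the same strings); objective: simpler.


-- ===== PORT A =====
def speakA : List (List Char) := [['a','y','a'], ['y','e'], ['w','o','o'], ['m','a']]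

-- one iteration of A's inner loop: word += b; if word in speak: word=''; if i+1==len and word=='': answer+=1
def stepA (n : Int) (st : List Char × Int) (ib : Int × Char) : List Char × Int :=
  let word := st.1 ++ [ib.2]
  let word := if word ∈ speakA then [] else word
  let answer := if ib.1 + 1 = n ∧ word = [] then st.2 + 1 else st.2
  (word, answer)

def solution (babbling : List String) : Int :=
  babbling.foldl
    (fun answer babb =>
      ((PySem.List.enumerate babb.toList).foldl (stepA babb.toList.length) ([], answer)).2)
    0

-- ===== PORT B =====
def okB (s : List Char) : Bool :=
  match s with
  | [] => true
  | c :: rest =>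
    if ['a','y','a'].isPrefixOf (c :: rest) then okB ((c :: rest).drop 3)
    else if ['y','e'].isPrefixOf (c :: rest) then okB ((c :: rest).drop 2)
    else if ['w','o','o'].isPrefixOf (c :: rest) then okB ((c :: rest).drop 3)
    else if ['m','a'].isPrefixOf (c :: rest) then okB ((c :: rest).drop 2)
    else false
termination_by s.length
decreasing_by all_goals simp

def solution_alt (babbling : List String) : Int :=
  ((babbling.filter (fun b => !b.toList.isEmpty && okB b.toList)).length : Int)

-- ===== PRECONDITION & SPEC =====
def Spec_solution (babbling : List String) (out : Int) : Prop := out = solution_alt babbling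
instance (babbling : List String) (out : Int) : Decidable (Spec_solution babbling out) := by unfold Spec_solution; infer_instance

-- ===== CLAIM (what is proved, stated in full; the proofs are below) =====
def Claim_equal_solution : Prop := ∀ (babbling : List String), Dom_solution babbling → Spec_solution babbling (solution babbling)

-- ===== LEMMAS AND PROOFS =====

-- A's inner loop as a word-rewriting function: final value of `word`
def procA (word : List Char) (s : List Char) : List Char :=
  match s with
  | [] => word
  | b :: rest =>
    let w := word ++ [b]
    procA (if w ∈ speakA then [] else w) rest

theorem innerAux (s : List Char) : ∀ (k : Int) (word : List Char) (ans : Int),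
    s ≠ [] →
    ((PySem.List.enumerate s k).foldl (stepA (k + s.length)) (word, ans)).2
      = ans + (if procA word s = [] then 1 else 0) := by
  induction s with
  | nil => intro _ _ _ h; exact absurd rfl h
  | cons b rest ih =>
    intro k word ans _
    rw [PySem.List.enumerate_cons]
    cases rest with
    | nil =>
      simp [stepA, procA, List.foldl]
      split <;> simp
    | cons b2 rest2 =>
      simp only [List.foldl_cons]
      have hk : (k + 1) + ((b2 :: rest2).length : Int)
          = k + ((b :: b2 :: rest2).length : Int) := by
        simp; ring
      rw [← hk, ih (k + 1) _ _ (by simp)]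
      simp only [stepA, procA]
      split <;> split <;>
        first
          | rfl
          | (rename_i hcond; exfalso; have := hcond.1; simp only [List.length_cons] at this; push_cast at this; omega)

-- if A's loop ends with empty word, the string starts with a syllable and the rest also succeeds
theorem procA_decomp (s : List Char) : ∀ (word : List Char),
    (word ≠ [] ∨ s ≠ []) → procA word s = [] →
    ∃ w t, w ∈ speakA ∧ word ++ s = w ++ t ∧ procA [] t = [] := by
  induction s with
  | nil =>
    intro word hne h
    simp [procA] at h
    rcases hne with hne | hne
    · exact absurd h hne
    · exact absurd rfl hne
  | cons b rest ih =>
    intro word _ h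
    simp only [procA] at h
    by_cases hm : (word ++ [b]) ∈ speakA
    · rw [if_pos hm] at h
      exact ⟨word ++ [b], rest, hm, by simp, h⟩
    · rw [if_neg hm] at h
      obtain ⟨w, t, hw, heq, ht⟩ := ih (word ++ [b]) (Or.inl (by simp)) h
      exact ⟨w, t, hw, by simpa using heq, ht⟩

theorem procA_aya (t : List Char) : procA [] ('a'::'y'::'a'::t) = procA [] t := by
  simp [procA, speakA]

theorem procA_ye (t : List Char) : procA [] ('y'::'e'::t) = procA [] t := by
  simp [procA, speakA]

theorem procA_woo (t : List Char) : procA [] ('w'::'o'::'o'::t) = procA [] t := by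
  simp [procA, speakA]

theorem procA_ma (t : List Char) : procA [] ('m'::'a'::t) = procA [] t := by
  simp [procA, speakA]

theorem okB_aya (t : List Char) : okB ('a'::'y'::'a'::t) = okB t := by
  rw [okB]; simp [List.isPrefixOf]

theorem okB_ye (t : List Char) : okB ('y'::'e'::t) = okB t := by
  rw [okB]; simp [List.isPrefixOf]

theorem okB_woo (t : List Char) : okB ('w'::'o'::'o'::t) = okB t := by
  rw [okB]; simp [List.isPrefixOf]

theorem okB_ma (t : List Char) : okB ('m'::'a'::t) = okB t := by
  rw [okB]; simp [List.isPrefixOf]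

theorem main_iff_aux : ∀ (n : Nat) (s : List Char), s.length ≤ n →
    ((procA [] s = []) ↔ okB s = true) := by
  intro n
  induction n with
  | zero =>
    intro s hs
    have : s = [] := List.eq_nil_of_length_eq_zero (Nat.le_zero.mp hs)
    subst this
    simp [procA, okB]
  | succ n ih =>
    intro s hs
    cases s with
    | nil => simp [procA, okB]
    | cons c rest =>
      constructor
      · intro h
        obtain ⟨w, t, hw, heq, ht⟩ :=
          procA_decomp (c :: rest) [] (Or.inr (by simp)) h
        simp only [List.nil_append] at heq
        have hlen : (c :: rest).length = w.length + t.length := by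
          rw [heq]; simp
        simp only [speakA, List.mem_cons, List.not_mem_nil, or_false] at hw
        rcases hw with hw | hw | hw | hw <;> subst hw <;>
          rw [heq] <;> simp only [List.cons_append, List.nil_append] <;>
          simp only [List.length_cons] at hlen hs
        · rw [okB_aya]; exact (ih t (by omega)).mp ht
        · rw [okB_ye]; exact (ih t (by omega)).mp ht
        · rw [okB_woo]; exact (ih t (by omega)).mp ht
        · rw [okB_ma]; exact (ih t (by omega)).mp ht
      · intro h
        rw [okB] at h
        split at h
        · next hp =>
          obtain ⟨t, ht⟩ := List.isPrefixOf_iff_prefix.mp hp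
          have hdrop : List.drop 3 (c :: rest) = t := by rw [← ht]; simp
          rw [hdrop] at h
          rw [← ht]; simp only [List.cons_append, List.nil_append]
          rw [procA_aya]
          have hlt : t.length ≤ n := by
            have := congrArg List.length ht; simp only [List.length_append, List.length_cons, List.length_nil] at this hs; omega
          exact (ih t hlt).mpr h
        · split at h
          · next hp =>
            obtain ⟨t, ht⟩ := List.isPrefixOf_iff_prefix.mp hp
            have hdrop : List.drop 2 (c :: rest) = t := by rw [← ht]; simp
            rw [hdrop] at h
            rw [← ht]; simp only [List.cons_append, List.nil_append]
            rw [procA_ye]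
            have hlt : t.length ≤ n := by
              have := congrArg List.length ht; simp only [List.length_append, List.length_cons, List.length_nil] at this hs; omega
            exact (ih t hlt).mpr h
          · split at h
            · next hp =>
              obtain ⟨t, ht⟩ := List.isPrefixOf_iff_prefix.mp hp
              have hdrop : List.drop 3 (c :: rest) = t := by rw [← ht]; simp
              rw [hdrop] at h
              rw [← ht]; simp only [List.cons_append, List.nil_append]
              rw [procA_woo]
              have hlt : t.length ≤ n := by
                have := congrArg List.length ht; simp only [List.length_append, List.length_cons, List.length_nil] at this hs; omega
              exact (ih t hlt).mpr h
            · split at h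
              · next hp =>
                obtain ⟨t, ht⟩ := List.isPrefixOf_iff_prefix.mp hp
                have hdrop : List.drop 2 (c :: rest) = t := by rw [← ht]; simp
                rw [hdrop] at h
                rw [← ht]; simp only [List.cons_append, List.nil_append]
                rw [procA_ma]
                have hlt : t.length ≤ n := by
                  have := congrArg List.length ht; simp only [List.length_append, List.length_cons, List.length_nil] at this hs; omega
                exact (ih t hlt).mpr h
              · exact absurd h (by simp)

theorem main_iff (s : List Char) : (procA [] s = []) ↔ okB s = true :=
  main_iff_aux s.length s le_rfl

-- outer fold = count
theorem outerAux (babbling : List String) : ∀ (ans : Int),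
    babbling.foldl
      (fun answer babb =>
        ((PySem.List.enumerate babb.toList).foldl (stepA babb.toList.length) ([], answer)).2)
      ans
    = ans + ((babbling.filter (fun b => !b.toList.isEmpty && okB b.toList)).length : Int) := by
  induction babbling with
  | nil => intro ans; simp
  | cons b rest ih =>
    intro ans
    simp only [List.foldl_cons]
    rw [ih]
    by_cases hb : b.toList = []
    · simp [hb, List.filter]
    · have := innerAux b.toList 0 [] ans hb
      simp only [zero_add] at this
      rw [this]
      simp only [List.filter_cons]
      by_cases hok : okB b.toList = true
      · simp [hok, (main_iff b.toList).mpr hok, hb]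
        ring
      · have : procA [] b.toList ≠ [] := fun h => hok ((main_iff b.toList).mp h)
        simp [hok, this]

-- ===== VERDICT (by name: the statement is the Claim_ definition above) =====
theorem solution_spec : Claim_equal_solution := by
  intro babbling _
  show solution babbling = solution_alt babbling
  unfold solution solution_alt
  rw [outerAux]
  simp
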